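-- pv_equiv track=rewrite | github.com/nanditamohan/Scheduler | rss2json.py | quotes
-- ===== SOURCE A (Python) =====
-- def quotes(jsonfull):
--     """Converts double quotes within JSON object to single quotes"""
--     # replace double quotes between the third double quote and the last double quote with single quotes
--
--     """
--     def find_2nd(string, substring):
--    return string.find(substring, string.find(substring) + 1)
--     """
--     returnstring = ''
--     fullline = ''
--     for line in jsonfull.splitlines():
--         if line.count('"') > 4:
--             withoutfirstquote = line[line.find('"') + 1:]
--             fullline = line[0:line.find('"')+1]
--             withoutsecondquote = withoutfirstquote[withoutfirstquote.find('"') + 1:]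
--             fullline = fullline + withoutfirstquote[0:withoutfirstquote.find('"')+1]
--             withoutthirdquote = withoutsecondquote[withoutsecondquote.find('"') + 1:]
--             fullline = fullline + withoutsecondquote[0:withoutsecondquote.find('"')+1]
--             dequoteArea = withoutthirdquote[0:withoutthirdquote.rfind('"')]
--             dequoteArea = dequoteArea.replace('"', "'")
--             fullline = fullline + dequoteArea + withoutthirdquote[withoutthirdquote.rfind('"'):]
--         else:
--             fullline = line
--         returnstring += fullline + "\n"
--         fullline = ''
--     return returnstring
-- ===== SOURCE B (Python) =====
-- def quotes(jsonfull):
--     """Converts double quotes within JSON object to single quotes.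
--
--     Single left-to-right pass per line with an occurrence counter instead of
--     repeated find/rfind slicing: quote occurrences 4..k-1 (of k) become single
--     quotes."""
--     returnstring = ''
--     for line in jsonfull.splitlines():
--         k = line.count('"')
--         if k > 4:
--             seen = 0
--             chars = []
--             for ch in line:
--                 if ch == '"':
--                     seen += 1
--                     chars.append('"' if seen <= 3 or seen == k else "'")
--                 else:
--                     chars.append(ch)
--             line = ''.join(chars)
--         returnstring += line + "\n"
--     return returnstring
-- ===== Notes on version B (the rewrite author's own statement) =====
-- stated objective: alternative
-- what changed: Replaces the repeated find/rfind slice-and-rebuild of each line with a single left-to-right pass that counts quote occurrences and rewrites occurrences 4..k-1 of k to single quotes.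
import Mathlib
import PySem

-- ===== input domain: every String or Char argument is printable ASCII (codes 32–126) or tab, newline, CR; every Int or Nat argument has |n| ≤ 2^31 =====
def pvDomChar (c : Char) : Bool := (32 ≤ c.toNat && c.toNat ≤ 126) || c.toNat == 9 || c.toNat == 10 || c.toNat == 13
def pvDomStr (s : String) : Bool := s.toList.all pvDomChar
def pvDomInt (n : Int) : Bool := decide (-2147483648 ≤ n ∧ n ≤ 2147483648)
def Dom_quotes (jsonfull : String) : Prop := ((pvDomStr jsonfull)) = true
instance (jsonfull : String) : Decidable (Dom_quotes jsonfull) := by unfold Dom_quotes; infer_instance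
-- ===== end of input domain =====

-- B replaces A's repeated find/rfind slice-and-rebuild of each line by a single
-- left-to-right pass with a quote-occurrence counter (objective: alternative, same cost).

-- ===== PORT A =====
-- the body of A's `if line.count('"') > 4` branch, step for step
def quotesLineA (line : List Char) : List Char :=
  let withoutfirstquote := PySem.Chars.slice line (some (PySem.Chars.find line ['"'] + 1)) none
  let fullline := PySem.Chars.slice line (some 0) (some (PySem.Chars.find line ['"'] + 1))
  let withoutsecondquote := PySem.Chars.slice withoutfirstquote (some (PySem.Chars.find withoutfirstquote ['"'] + 1)) none
  let fullline := fullline ++ PySem.Chars.slice withoutfirstquote (some 0) (some (PySem.Chars.find withoutfirstquote ['"'] + 1))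
  let withoutthirdquote := PySem.Chars.slice withoutsecondquote (some (PySem.Chars.find withoutsecondquote ['"'] + 1)) none
  let fullline := fullline ++ PySem.Chars.slice withoutsecondquote (some 0) (some (PySem.Chars.find withoutsecondquote ['"'] + 1))
  let dequoteArea := PySem.Chars.slice withoutthirdquote (some 0) (some (PySem.Chars.rfind withoutthirdquote ['"']))
  let dequoteArea := PySem.Chars.replace dequoteArea ['"'] ['\'']
  fullline ++ dequoteArea ++ PySem.Chars.slice withoutthirdquote (some (PySem.Chars.rfind withoutthirdquote ['"'])) none

def quotes (jsonfull : String) : String :=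
  String.ofList <|
    (PySem.Chars.splitlines jsonfull.toList).foldl
      (fun returnstring line =>
        let fullline := if 4 < PySem.Chars.count line ['"'] then quotesLineA line else line
        returnstring ++ fullline ++ ['\n']) []

-- ===== PORT B =====
-- B's inner single pass: quote occurrence counter, occurrences 4..k-1 of k become '\''
def quotesLineB (line : List Char) : List Char :=
  let k := PySem.Chars.count line ['"']
  (line.foldl
    (fun (st : Nat × List Char) ch =>
      if ch = '"' then
        let seen := st.1 + 1
        (seen, st.2 ++ [if seen ≤ 3 ∨ seen = k then '"' else '\''])
      else (st.1, st.2 ++ [ch])) (0, [])).2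

def quotes_alt (jsonfull : String) : String :=
  String.ofList <|
    (PySem.Chars.splitlines jsonfull.toList).foldl
      (fun returnstring line =>
        let line' := if 4 < PySem.Chars.count line ['"'] then quotesLineB line else line
        returnstring ++ line' ++ ['\n']) []

-- ===== PRECONDITION & SPEC =====
def Spec_quotes (jsonfull : String) (out : String) : Prop := out = quotes_alt jsonfull
instance (jsonfull : String) (out : String) : Decidable (Spec_quotes jsonfull out) := by unfold Spec_quotes; infer_instance

-- ===== CLAIM (what is proved, stated in full; the proofs are below) =====
def Claim_equal_quotes : Prop := ∀ (jsonfull : String), Dom_quotes jsonfull → Spec_quotes jsonfull (quotes jsonfull)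

-- ===== LEMMAS AND PROOFS =====

lemma count_go_single (c : Char) : ∀ (fuel : Nat) (l : List Char) (acc : Nat), l.length ≤ fuel →
    PySem.Chars.count.go [c] fuel l acc = acc + l.count c := by
  intro fuel
  induction fuel with
  | zero =>
    intro l acc h
    rw [List.length_eq_zero_iff.mp (Nat.le_zero.mp h)]
    simp [PySem.Chars.count.go]
  | succ n ih =>
    intro l acc h
    cases l with
    | nil => simp [PySem.Chars.count.go]
    | cons x t =>
      rw [PySem.Chars.count.go]
      by_cases hx : x = c
      · subst hx
        simp only [List.isPrefixOf, BEq.rfl, Bool.true_and, if_true, List.length_cons,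
          List.drop_succ_cons, List.length_nil, List.drop_zero]
        rw [ih t (acc+1) (by simpa using h)]
        simp [List.count_cons]
        omega
      · simp only [List.isPrefixOf]
        rw [if_neg (by simp [beq_iff_eq]; exact fun h => (hx h.symm).elim)]
        rw [ih t acc (by simpa using h)]
        simp [List.count_cons, hx]

lemma count_single (c : Char) (s : List Char) : PySem.Chars.count s [c] = s.count c := by
  rw [PySem.Chars.count]
  simp only [List.isEmpty, Bool.false_eq_true, if_false]
  exact (count_go_single c s.length s 0 le_rfl).trans (by omega)

lemma find_go_first (c : Char) : ∀ (p r : List Char) (k : Nat), c ∉ p →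
    PySem.Chars.find.go [c] (p ++ c :: r) k = (k : Int) + p.length := by
  intro p
  induction p with
  | nil => intro r k _; rw [PySem.Chars.find.go.eq_def]; simp [List.isPrefixOf]
  | cons x t ih =>
    intro r k hx
    rw [List.cons_append, PySem.Chars.find.go.eq_def]
    simp only []
    rw [if_neg (by simp [List.isPrefixOf, beq_iff_eq]; exact fun h => (hx (by simp [h])).elim)]
    rw [ih r (k+1) (fun h => hx (List.mem_cons_of_mem _ h))]
    simp [List.length_cons]; push_cast; ring

lemma find_first (c : Char) (p r : List Char) (hp : c ∉ p) :
    PySem.Chars.find (p ++ c :: r) [c] = (p.length : Int) := by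
  rw [PySem.Chars.find, find_go_first c p r 0 hp]; simp

lemma rfind_go_last (c : Char) (s : List Char) (m : Nat)
    (hm : [c].isPrefixOf (s.drop m) = true)
    (hn : ∀ i, m < i → [c].isPrefixOf (s.drop i) = false) :
    ∀ j, m ≤ j → PySem.Chars.rfind.go s [c] j = (m : Int) := by
  intro j
  induction j with
  | zero =>
    intro hj
    rw [PySem.Chars.rfind.go.eq_def]
    simp only [Nat.le_zero.mp hj] at hm ⊢
    simp only [List.drop_zero] at hm
    simp [hm, Nat.le_zero.mp hj]
  | succ n ih =>
    intro hj
    rw [PySem.Chars.rfind.go.eq_def]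
    by_cases he : m = n + 1
    · subst he; simp [hm]
    · have hlt : m ≤ n := by omega
      have h1 := hn (n+1) (by omega)
      simp only [h1, Bool.false_eq_true, if_false]
      exact ih hlt

lemma rfind_last (c : Char) (f t : List Char) (ht : c ∉ t) :
    PySem.Chars.rfind (f ++ c :: t) [c] = (f.length : Int) := by
  rw [PySem.Chars.rfind]
  apply rfind_go_last
  · rw [List.drop_append_of_le_length le_rfl]
    simp [List.isPrefixOf]
  · intro i hi
    rcases Nat.exists_eq_add_of_lt hi with ⟨d, rfl⟩
    rw [show f.length + d + 1 = f.length + (d + 1) by omega]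
    have hD : (f ++ c :: t).drop (f.length + (d + 1)) = t.drop d :=
      List.drop_length_add_append (d + 1)
    rw [hD]
    cases hd : t.drop d with
    | nil => simp [List.isPrefixOf]
    | cons y u =>
      have hy : y ∈ t := by
        have := List.mem_of_mem_drop (l := t) (i := d) (by rw [hd]; exact List.mem_cons_self)
        exact this
      simp [List.isPrefixOf, beq_iff_eq]
      exact fun h => (ht (h ▸ hy)).elim
  · simp [List.length_append]

lemma replace_go_single (c d : Char) : ∀ (fuel : Nat) (l acc : List Char), l.length ≤ fuel →
    PySem.Chars.replace.go [c] [d] fuel l acc =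
      acc.reverse ++ l.map (fun x => if x = c then d else x) := by
  intro fuel
  induction fuel with
  | zero =>
    intro l acc h
    rw [List.length_eq_zero_iff.mp (Nat.le_zero.mp h)]
    simp [PySem.Chars.replace.go]
  | succ n ih =>
    intro l acc h
    cases l with
    | nil => simp [PySem.Chars.replace.go]
    | cons x t =>
      rw [PySem.Chars.replace.go.eq_def]
      by_cases hx : x = c
      · subst hx
        simp only [List.isPrefixOf, BEq.rfl, Bool.true_and, List.isPrefixOf_nil_left, if_true,
          List.length_cons, List.length_nil, List.drop_succ_cons, List.drop_zero]
        rw [ih t ([d].reverse ++ acc) (by simpa using h)]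
        simp
      · simp only [List.isPrefixOf]
        rw [if_neg (by simp [beq_iff_eq]; exact fun h => (hx h.symm).elim)]
        rw [ih t (x :: acc) (by simpa using h)]
        simp [hx]

lemma replace_single (c d : Char) (s : List Char) :
    PySem.Chars.replace s [c] [d] = s.map (fun x => if x = c then d else x) := by
  rw [PySem.Chars.replace]
  simp only [List.isEmpty, Bool.false_eq_true, if_false]
  rw [replace_go_single c d s.length s [] le_rfl]
  simp

-- first-occurrence decomposition
lemma exists_first_split (c : Char) : ∀ (s : List Char), c ∈ s →
    ∃ p r, c ∉ p ∧ s = p ++ c :: r := by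
  intro s
  induction s with
  | nil => intro h; simp at h
  | cons x t ih =>
    intro h
    by_cases hx : x = c
    · exact ⟨[], t, by simp, by simp [hx]⟩
    · rcases ih (by rcases List.mem_cons.mp h with h | h; exact (hx h.symm).elim; exact h) with
        ⟨p, r, hp, he⟩
      exact ⟨x :: p, r, by simp [hp]; exact fun h => (hx h.symm).elim, by simp [he]⟩

lemma exists_last_split (c : Char) (s : List Char) (h : c ∈ s) :
    ∃ f t, c ∉ t ∧ s = f ++ c :: t := by
  rcases exists_first_split c s.reverse (by simpa using h) with ⟨p, r, hp, he⟩
  refine ⟨r.reverse, p.reverse, by simpa using hp, ?_⟩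
  have := congrArg List.reverse he
  simpa using this

-- one cut of A's scan: find the first quote, peel prefix and quote off
lemma sliceA_cut (c : Char) (p r : List Char) (hp : c ∉ p) :
    PySem.Chars.slice (p ++ c :: r) (some 0) (some (PySem.Chars.find (p ++ c :: r) [c] + 1)) = p ++ [c] ∧
    PySem.Chars.slice (p ++ c :: r) (some (PySem.Chars.find (p ++ c :: r) [c] + 1)) none = r := by
  rw [find_first c p r hp]
  have hcast : (p.length : Int) + 1 = ((p.length + 1 : Nat) : Int) := by push_cast; ring
  constructor
  · rw [PySem.Chars.slice_eq_listSlice, PySem.List.slice_zero_start, hcast,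
      PySem.List.slice_to_natCast]
    simp [List.take_append]
  · rw [PySem.Chars.slice_eq_listSlice, hcast, PySem.List.slice_from_natCast]
    simp [List.drop_append]

lemma lineA_eq (c : Char) (p1 p2 p3 mid tl : List Char)
    (h1 : c ∉ p1) (h2 : c ∉ p2) (h3 : c ∉ p3) (ht : c ∉ tl) (hc : c = '"') :
    quotesLineA (p1 ++ c :: (p2 ++ c :: (p3 ++ c :: (mid ++ c :: tl)))) =
      p1 ++ c :: (p2 ++ c :: (p3 ++ c :: ((mid.map fun x => if x = '"' then '\'' else x) ++ c :: tl))) := by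
  subst hc
  simp only [quotesLineA]
  rw [(sliceA_cut '"' p1 _ h1).1, (sliceA_cut '"' p1 _ h1).2,
      (sliceA_cut '"' p2 _ h2).1, (sliceA_cut '"' p2 _ h2).2,
      (sliceA_cut '"' p3 _ h3).1, (sliceA_cut '"' p3 _ h3).2]
  rw [rfind_last '"' mid tl ht]
  rw [PySem.Chars.slice_eq_listSlice, PySem.List.slice_zero_start, PySem.List.slice_to_natCast,
      PySem.Chars.slice_eq_listSlice, PySem.List.slice_from_natCast]
  rw [List.take_left, List.drop_left]
  rw [replace_single]
  simp

-- B's step function with the line's total quote count k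
def stepB (k : Nat) (st : Nat × List Char) (ch : Char) : Nat × List Char :=
  if ch = '"' then
    let seen := st.1 + 1
    (seen, st.2 ++ [if seen ≤ 3 ∨ seen = k then '"' else '\''])
  else (st.1, st.2 ++ [ch])

lemma stepB_nonquote (k seen : Nat) (acc : List Char) (x : Char) (hx : x ≠ '"') :
    stepB k (seen, acc) x = (seen, acc ++ [x]) := by
  simp [stepB, hx]

lemma foldB_noquote (k : Nat) : ∀ (xs : List Char) (seen : Nat) (acc : List Char), '"' ∉ xs →
    xs.foldl (stepB k) (seen, acc) = (seen, acc ++ xs) := by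
  intro xs
  induction xs with
  | nil => simp
  | cons x t ih =>
    intro seen acc hx
    rw [List.foldl_cons, stepB_nonquote k seen acc x (fun h => hx (by simp [h]))]
    rw [ih seen (acc ++ [x]) (fun h => hx (List.mem_cons_of_mem _ h))]
    simp

lemma foldB_mid (k : Nat) : ∀ (xs : List Char) (seen : Nat) (acc : List Char),
    3 ≤ seen → seen + xs.count '"' < k →
    xs.foldl (stepB k) (seen, acc) =
      (seen + xs.count '"', acc ++ xs.map fun x => if x = '"' then '\'' else x) := by
  intro xs
  induction xs with
  | nil => simp
  | cons x t ih =>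
    intro seen acc h3 hk
    rw [List.foldl_cons]
    by_cases hx : x = '"'
    · subst hx
      have hcnt : (('"') :: t).count '"' = t.count '"' + 1 := by simp
      rw [hcnt] at hk
      have hcond : ¬(seen + 1 ≤ 3 ∨ seen + 1 = k) := by omega
      have hs : stepB k (seen, acc) '"' = (seen + 1, acc ++ ['\'']) := by
        simp only [stepB, if_pos rfl]
        rw [if_neg hcond]
        simp
      rw [hs, ih (seen + 1) _ (by omega) (by omega)]
      simp
      omega
    · rw [stepB_nonquote k seen acc x hx]
      rw [ih seen _ h3 (by simp [hx] at hk ⊢; omega)]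
      simp [hx]

lemma stepB_quote_keep (k seen : Nat) (acc : List Char) (h : seen + 1 ≤ 3 ∨ seen + 1 = k) :
    stepB k (seen, acc) '"' = (seen + 1, acc ++ ['"']) := by
  simp only [stepB, if_pos rfl]
  rw [if_pos h]
  simp

lemma lineB_eq (c : Char) (p1 p2 p3 mid tl : List Char)
    (h1 : c ∉ p1) (h2 : c ∉ p2) (h3 : c ∉ p3) (ht : c ∉ tl) (hc : c = '"') :
    quotesLineB (p1 ++ c :: (p2 ++ c :: (p3 ++ c :: (mid ++ c :: tl)))) =
      p1 ++ c :: (p2 ++ c :: (p3 ++ c :: ((mid.map fun x => if x = '"' then '\'' else x) ++ c :: tl))) := by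
  subst hc
  simp only [quotesLineB]
  rw [count_single]
  set k := (p1 ++ '"' :: (p2 ++ '"' :: (p3 ++ '"' :: (mid ++ '"' :: tl)))).count '"' with hk
  have hkv : k = mid.count '"' + 4 := by
    rw [hk]
    simp [List.count_append, List.count_cons, List.count_eq_zero.mpr h1,
      List.count_eq_zero.mpr h2, List.count_eq_zero.mpr h3, List.count_eq_zero.mpr ht]
  show (List.foldl (stepB k) (0, []) _).2 = _
  rw [List.foldl_append, foldB_noquote k p1 0 [] h1, List.foldl_cons,
      stepB_quote_keep k 0 _ (by omega),
      List.foldl_append, foldB_noquote k p2 1 _ h2, List.foldl_cons,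
      stepB_quote_keep k 1 _ (by omega),
      List.foldl_append, foldB_noquote k p3 2 _ h3, List.foldl_cons,
      stepB_quote_keep k 2 _ (by omega),
      List.foldl_append, foldB_mid k mid 3 _ (by omega) (by omega), List.foldl_cons,
      stepB_quote_keep k (3 + mid.count '"') _ (by omega),
      foldB_noquote k tl _ _ ht]
  simp

lemma count_split (c : Char) (p r : List Char) (hp : c ∉ p) :
    (p ++ c :: r).count c = r.count c + 1 := by
  simp [List.count_append, List.count_eq_zero.mpr hp]

lemma lineAB (line : List Char) (h : 4 < PySem.Chars.count line ['"']) :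
    quotesLineA line = quotesLineB line := by
  rw [count_single] at h
  obtain ⟨p1, r1, h1, e1⟩ := exists_first_split '"' line (by
    exact List.count_pos_iff.mp (by omega))
  rw [e1, count_split '"' p1 r1 h1] at h
  obtain ⟨p2, r2, h2, e2⟩ := exists_first_split '"' r1 (List.count_pos_iff.mp (by omega))
  rw [e2, count_split '"' p2 r2 h2] at h
  obtain ⟨p3, r3, h3, e3⟩ := exists_first_split '"' r2 (List.count_pos_iff.mp (by omega))
  rw [e3, count_split '"' p3 r3 h3] at h
  obtain ⟨mid, tl, ht, e4⟩ := exists_last_split '"' r3 (List.count_pos_iff.mp (by omega))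
  subst e4 e3 e2 e1
  rw [lineA_eq '"' p1 p2 p3 mid tl h1 h2 h3 ht rfl,
      lineB_eq '"' p1 p2 p3 mid tl h1 h2 h3 ht rfl]

-- ===== VERDICT (by name: the statement is the Claim_ definition above) =====
theorem quotes_spec : Claim_equal_quotes := by
  intro s _
  unfold Spec_quotes quotes quotes_alt
  congr 1
  have hf : (fun (returnstring line : List Char) =>
      let fullline := if 4 < PySem.Chars.count line ['"'] then quotesLineA line else line
      returnstring ++ fullline ++ ['\n']) =
      (fun (returnstring line : List Char) =>
      let line' := if 4 < PySem.Chars.count line ['"'] then quotesLineB line else line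
      returnstring ++ line' ++ ['\n']) := by
    funext acc l
    by_cases h : 4 < PySem.Chars.count l ['"']
    · simp only [h, if_pos, lineAB l h]
    · simp [h]
  rw [hf]
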